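-- pv_equiv track=rewrite | github.com/andreocunha/UFES_University_Projects_and_Activities | Programação Competitiva/P2/F.py | contaConsultas
-- ===== SOURCE A (Python) =====
-- def contaConsultas(stringLine, x, y):
--     characterAtual = stringLine[x-1] # -> .
--     result = 0
--
--     for i in range(y - x): # 3
--         if characterAtual == stringLine[x+i]:
--             result += 1
--         else:
--             characterAtual = stringLine[x+i]
--
--     return result
-- ===== SOURCE B (Python) =====
-- from itertools import groupby
--
-- def contaConsultas(stringLine, x, y):
--     # positions A inspects: x-1 (the boundary) and x..y-1
--     chars = [stringLine[j] for j in range(x - 1, max(x, y))]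
--     return len(chars) - sum(1 for _ in groupby(chars))
-- ===== Notes on version B (the rewrite author's own statement) =====
-- stated objective: idiomatic
-- what changed: B builds the character range A inspects and counts maximal runs of equal characters with itertools.groupby, returning length minus the number of runs (adjacent equal pairs = length - runs), instead of A's loop carrying a mutable previous-character variable and counter.
import Mathlib
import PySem

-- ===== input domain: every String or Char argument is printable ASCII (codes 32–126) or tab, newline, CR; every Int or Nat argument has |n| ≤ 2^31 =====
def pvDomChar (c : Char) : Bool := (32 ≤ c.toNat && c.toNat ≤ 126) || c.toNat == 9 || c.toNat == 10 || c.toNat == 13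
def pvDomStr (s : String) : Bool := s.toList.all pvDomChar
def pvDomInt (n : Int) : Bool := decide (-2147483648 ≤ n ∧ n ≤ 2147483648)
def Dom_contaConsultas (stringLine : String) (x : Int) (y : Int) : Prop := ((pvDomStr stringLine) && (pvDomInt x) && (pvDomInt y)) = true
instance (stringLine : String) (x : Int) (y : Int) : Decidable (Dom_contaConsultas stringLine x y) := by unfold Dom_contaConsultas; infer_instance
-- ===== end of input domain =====

-- B counts the maximal runs of equal characters among the positions A inspects (itertools.groupby)
-- and returns length minus number of runs, instead of A's scalar loop with a previous-character
-- variable and a counter. Same cost; a different, more idiomatic decomposition.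

-- ===== PORT A =====
-- literal port of A: read stringLine[x-1], then loop i in range(y-x) comparing against stringLine[x+i].
-- pyGet? = none is Python's IndexError, excluded by Pre_ (the state is then left unchanged; unreachable inside Pre_).
def contaConsultas (stringLine : String) (x : Int) (y : Int) : Int :=
  let cs := stringLine.toList
  match PySem.List.pyGet? cs (x - 1) with
  | none => 0
  | some c0 =>
    ((PySem.List.pyRange 0 (y - x) 1).foldl
      (fun (st : Char × Int) i =>
        match PySem.List.pyGet? cs (x + i) with
        | none => st
        | some c => if st.1 == c then (st.1, st.2 + 1) else (c, st.2))
      (c0, 0)).2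

-- ===== PORT B =====
-- number of maximal runs of equal adjacent elements = what 'sum(1 for _ in groupby(chars))' counts
def pvRuns : List Char → Int
  | [] => 0
  | [_] => 1
  | a :: b :: l => (if a == b then 0 else 1) + pvRuns (b :: l)

-- literal port of Source B: chars = [stringLine[j] for j in range(x-1, max(x, y))];
-- len(chars) - sum(1 for _ in groupby(chars)).  stringLine[j] is pyGet?; the .getD default
-- is never used inside Pre_ (Python raises IndexError there, and Pre_ excludes exactly that).
def contaConsultas_alt (stringLine : String) (x : Int) (y : Int) : Int :=
  let cs := stringLine.toList
  let chars := (PySem.List.pyRange (x - 1) (max x y) 1).map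
    (fun j => (PySem.List.pyGet? cs j).getD ' ')
  (chars.length : Int) - pvRuns chars

-- ===== PRECONDITION & SPEC =====
-- Pre_ is exactly A's domain: the boundary read stringLine[x-1] and (when the loop runs) the
-- reads stringLine[x] .. stringLine[y-1] are in Python's index range [-len, len).
def Pre_contaConsultas (stringLine : String) (x : Int) (y : Int) : Prop :=
  -(stringLine.toList.length : Int) ≤ x - 1 ∧ x - 1 < (stringLine.toList.length : Int) ∧
    (x < y → y - 1 < (stringLine.toList.length : Int))
instance (stringLine : String) (x : Int) (y : Int) : Decidable (Pre_contaConsultas stringLine x y) := by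
  unfold Pre_contaConsultas; infer_instance
def pvWitness_contaConsultas : String × Int × Int := ("aabba", 1, 5)

def Spec_contaConsultas (stringLine : String) (x : Int) (y : Int) (out : Int) : Prop := out = contaConsultas_alt stringLine x y
instance (stringLine : String) (x : Int) (y : Int) (out : Int) : Decidable (Spec_contaConsultas stringLine x y out) := by unfold Spec_contaConsultas; infer_instance

-- ===== CLAIM (what is proved, stated in full; the proofs are below) =====
def Claim_equal_contaConsultas : Prop := ∀ (stringLine : String) (x : Int) (y : Int), Dom_contaConsultas stringLine x y → Pre_contaConsultas stringLine x y → Spec_contaConsultas stringLine x y (contaConsultas stringLine x y)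

-- ===== LEMMAS AND PROOFS =====

-- A's loop body on the state (previous char, count)
def pvStepA (st : Char × Int) (c : Char) : Char × Int :=
  if st.1 == c then (st.1, st.2 + 1) else (c, st.2)

-- number of equal adjacent pairs in a list
def pvPairs (l : List Char) : Int :=
  (l.zip l.tail).foldl (fun (acc : Int) p => acc + (if p.1 == p.2 then 1 else 0)) 0

theorem pvPairs_foldl (l : List (Char × Char)) (r : Int) :
    l.foldl (fun (acc : Int) p => acc + (if p.1 == p.2 then 1 else 0)) r
      = r + l.foldl (fun (acc : Int) p => acc + (if p.1 == p.2 then 1 else 0)) 0 := by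
  induction l generalizing r with
  | nil => simp
  | cons p l ih =>
    simp only [List.foldl_cons]
    rw [ih (r + _), ih (0 + _)]
    ring

theorem pvPairs_cons_cons (a b : Char) (l : List Char) :
    pvPairs (a :: b :: l) = (if a == b then 1 else 0) + pvPairs (b :: l) := by
  simp only [pvPairs, List.tail_cons, List.zip_cons_cons, List.foldl_cons]
  rw [pvPairs_foldl]
  ring

-- A's loop, read as a fold over the characters it visits, counts equal adjacent pairs.
theorem pvLoop_eq_pairs (ds : List Char) (c0 : Char) (r : Int) :
    (ds.foldl pvStepA (c0, r)).2 = r + pvPairs (c0 :: ds) := by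
  induction ds generalizing c0 r with
  | nil => simp [pvPairs]
  | cons c ds ih =>
    simp only [List.foldl_cons, pvStepA, pvPairs_cons_cons]
    by_cases h : (c0 == c) = true
    · have hc : c0 = c := beq_iff_eq.mp h
      rw [if_pos h, if_pos h, ih, hc]
      ring
    · rw [if_neg h, if_neg h, ih]
      ring

-- runs + equal-adjacent pairs = length, for a nonempty list
theorem pvRuns_add_pairs (a : Char) (l : List Char) :
    pvRuns (a :: l) + pvPairs (a :: l) = ((a :: l).length : Int) := by
  induction l generalizing a with
  | nil => simp [pvRuns, pvPairs]
  | cons b l ih =>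
    simp only [pvRuns, pvPairs_cons_cons, List.length_cons] at *
    have := ih b
    split_ifs <;> push_cast at * <;> omega

-- A's index loop over successful reads is the pvStepA fold over the list of read characters.
theorem pvLoop_reads (cs : List Char) (x : Int) (d : Char) (L : List Int)
    (hL : ∀ i ∈ L, PySem.List.pyGet? cs (x + i) ≠ none) (st : Char × Int) :
    L.foldl
      (fun (st : Char × Int) i =>
        match PySem.List.pyGet? cs (x + i) with
        | none => st
        | some c => if st.1 == c then (st.1, st.2 + 1) else (c, st.2)) st
    = (L.map (fun i => (PySem.List.pyGet? cs (x + i)).getD d)).foldl pvStepA st := by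
  induction L generalizing st with
  | nil => simp
  | cons i L ih =>
    obtain ⟨c, hc⟩ := Option.ne_none_iff_exists'.mp (hL i (List.mem_cons_self))
    simp only [List.foldl_cons, List.map_cons, hc, Option.getD_some, pvStepA]
    exact ih (fun j hj => hL j (List.mem_cons_of_mem _ hj)) _

-- B's index range, decomposed into A's boundary index and A's loop indices
theorem pvRange_decomp (x y : Int) :
    PySem.List.pyRange (x - 1) (max x y) 1
      = (x - 1) :: (PySem.List.pyRange 0 (y - x) 1).map (fun i => x + i) := by
  rw [PySem.List.pyRange_one_cons (by omega : x - 1 < max x y)]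
  have hx : x - 1 + 1 = x := by omega
  rw [hx]
  congr 1
  rcases le_or_gt y x with h | h
  · rw [max_eq_left h, PySem.List.pyRange_one_eq_nil (le_refl x),
      PySem.List.pyRange_one_eq_nil (by omega : y - x ≤ 0), List.map_nil]
  · rw [max_eq_right (le_of_lt h), PySem.List.pyRange_one x y,
      PySem.List.pyRange_one 0 (y - x)]
    simp [List.map_map, Function.comp_def]

-- ===== VERDICT (by name: the statement is the Claim_ definition above) =====
theorem contaConsultas_spec : Claim_equal_contaConsultas := by
  intro s x y _ hpre
  obtain ⟨h1, h2, h3⟩ := hpre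
  unfold Spec_contaConsultas
  unfold contaConsultas contaConsultas_alt
  set cs := s.toList with hcs
  cases hg : PySem.List.pyGet? cs (x - 1) with
  | none =>
    -- impossible inside Pre_: the boundary read is in range
    exfalso
    rw [PySem.List.pyGet?_eq_none_iff] at hg
    exact hg ⟨h1, h2⟩
  | some c0 =>
    simp only [hg]
    have hreads : ∀ i ∈ PySem.List.pyRange 0 (y - x) 1,
        PySem.List.pyGet? cs (x + i) ≠ none := by
      intro i hi
      rw [PySem.List.mem_pyRange_one] at hi
      rw [Ne, PySem.List.pyGet?_eq_none_iff, not_not]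
      simp only [PySem.Raise.InRange]
      omega
    rw [pvLoop_reads cs x ' ' _ hreads (c0, 0), pvLoop_eq_pairs, zero_add,
      pvRange_decomp, List.map_cons, List.map_map]
    simp only [Function.comp_def, hg, Option.getD_some]
    have := pvRuns_add_pairs c0
      ((PySem.List.pyRange 0 (y - x) 1).map (fun i => (PySem.List.pyGet? cs (x + i)).getD ' '))
    omega

-- the Pre_ witness satisfies Dom and Pre
theorem pvWitness_ok :
    Dom_contaConsultas pvWitness_contaConsultas.1 pvWitness_contaConsultas.2.1 pvWitness_contaConsultas.2.2
    ∧ Pre_contaConsultas pvWitness_contaConsultas.1 pvWitness_contaConsultas.2.1 pvWitness_contaConsultas.2.2 := by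
  constructor <;> decide
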